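-- pv_equiv track=rewrite | github.com/Amater444su/binar-test | binar.py | solution
-- ===== SOURCE A (Python) =====
-- def solution(num):
--
--     count_zero, count_one, count_0 = 0, 0, 0
--
--     a_list, list_count = [], []
--
--     a = bin(num)
--
--     for i in a:
--         a_list.append(i)
--
--     a_list = a_list[2:]
--
--     for i in a_list:
--         if i == '1':
--             count_one += 1
--         elif i == '0':
--             count_zero += 1
--
--     for i in a_list:
--         if i == '1':
--             list_count.append(count_0)
--             count_0 = 0
--             continue
--         else:
--             count_0 += 1
--
--     if count_zero == 0 or count_one == 1:
--         return 0, a_list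
--     else:
--         return max(list_count), a_list
-- ===== SOURCE B (Python) =====
-- def solution(num):
--     a_list = list(bin(num))[2:]
--     count_one = a_list.count('1')
--     count_zero = a_list.count('0')
--     if count_zero == 0 or count_one == 1:
--         return 0, a_list
--     segments = ''.join(a_list).split('1')
--     gaps = [len(seg) for seg in segments[:count_one]]
--     return max(gaps), a_list
-- ===== Notes on version B (the rewrite author's own statement) =====
-- stated objective: simpler
-- what changed: Replaces A's three explicit accumulator loops (char copy, two-counter tally, run-length accumulator with reset) with library counts and one split-on-'1' of the joined string, taking the first count_one segment lengths and their max.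
-- outside the precondition, e.g. on solution(0): A raises ValueError, B raises ValueError
import Mathlib
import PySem

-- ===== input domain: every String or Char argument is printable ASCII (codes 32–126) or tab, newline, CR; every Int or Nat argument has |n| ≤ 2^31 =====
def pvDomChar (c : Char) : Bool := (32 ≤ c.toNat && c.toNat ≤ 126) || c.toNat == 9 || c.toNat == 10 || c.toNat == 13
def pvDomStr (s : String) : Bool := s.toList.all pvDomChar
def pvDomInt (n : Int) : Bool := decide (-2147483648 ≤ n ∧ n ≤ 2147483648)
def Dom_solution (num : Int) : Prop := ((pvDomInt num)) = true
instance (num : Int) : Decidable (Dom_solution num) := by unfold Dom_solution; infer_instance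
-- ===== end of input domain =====

-- B replaces A's three accumulator loops by library counts and one split-on-'1' of the
-- joined string (objective: simpler).

-- ===== PORT A =====
def solution (num : Int) : Int × List String :=
  -- count_zero, count_one, count_0 = 0, 0, 0; a_list, list_count = [], []
  -- a = bin(num); for i in a: a_list.append(i); a_list = a_list[2:]
  let a_list : List String :=
    PySem.List.slice ((PySem.Int.pyBin num).toList.map (fun c => String.ofList [c])) (some 2) none
  -- for i in a_list: if i=='1': count_one += 1 elif i=='0': count_zero += 1
  let counts : Int × Int :=
    a_list.foldl (fun (p : Int × Int) i =>
      if i == "1" then (p.1 + 1, p.2)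
      else if i == "0" then (p.1, p.2 + 1)
      else p) (0, 0)
  let count_one := counts.1
  let count_zero := counts.2
  -- for i in a_list: if i=='1': list_count.append(count_0); count_0 = 0 else: count_0 += 1
  let st : List Int × Int :=
    a_list.foldl (fun (p : List Int × Int) i =>
      if i == "1" then (p.1 ++ [p.2], 0) else (p.1, p.2 + 1)) ([], 0)
  let list_count := st.1
  if count_zero == 0 || count_one == 1 then (0, a_list)
  else (((PySem.List.max? list_count (fun x => x)).getD 0), a_list)
  -- max(list_count) raises ValueError when list_count = [] (only num = 0); excluded by Pre_

-- ===== PORT B =====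
def solution_alt (num : Int) : Int × List String :=
  -- a_list = list(bin(num))[2:]
  let a_list : List String :=
    PySem.List.slice ((PySem.Int.pyBin num).toList.map (fun c => String.ofList [c])) (some 2) none
  let count_one := PySem.List.count a_list "1"
  let count_zero := PySem.List.count a_list "0"
  if count_zero == 0 || count_one == 1 then (0, a_list)
  else
    -- segments = ''.join(a_list).split('1')
    let segments := PySem.Chars.splitOn (PySem.Str.join "" a_list).toList ['1']
    -- gaps = [len(seg) for seg in segments[:count_one]]
    let gaps : List Int := (segments.take count_one).map (fun seg => (seg.length : Int))
    (((PySem.List.max? gaps (fun x => x)).getD 0), a_list)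
    -- max(gaps) raises ValueError when gaps = [] (only num = 0); excluded by Pre_

-- ===== PRECONDITION & SPEC =====
-- Pre_ excludes only num = 0, on which A raises ValueError (max of an empty list).
def Pre_solution (num : Int) : Prop := num ≠ 0
instance (num : Int) : Decidable (Pre_solution num) := by unfold Pre_solution; infer_instance
def pvWitness_solution : Int := (37)

def Spec_solution (num : Int) (out : Int × List String) : Prop := out = solution_alt num
instance (num : Int) (out : Int × List String) : Decidable (Spec_solution num out) := by unfold Spec_solution; infer_instance

-- ===== CLAIM (what is proved, stated in full; the proofs are below) =====
def Claim_equal_solution : Prop := ∀ (num : Int), Dom_solution num → Pre_solution num → Spec_solution num (solution num)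

-- ===== LEMMAS AND PROOFS =====

-- simple recursive specification of splitting a char list on one separator char
def split1 (s : Char) : List Char → List (List Char)
  | [] => [[]]
  | c :: cs =>
    if c = s then [] :: split1 s cs
    else
      match split1 s cs with
      | [] => [[c]]
      | h :: t => (c :: h) :: t

lemma split1_ne_nil (s : Char) (cs : List Char) : split1 s cs ≠ [] := by
  cases cs with
  | nil => simp [split1]
  | cons c cs =>
    simp only [split1]
    split_ifs <;> [simp; skip]
    cases split1 s cs <;> simp

lemma singleton_beq (c d : Char) : (String.ofList [c] == String.ofList [d]) = (c == d) := by
  by_cases h : c = d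
  · simp [h]
  · have : ¬ String.ofList [c] = String.ofList [d] := by
      intro hh; exact h (by simpa using congrArg String.toList hh)
    simp [h, this]

lemma one_str : ("1" : String) = String.ofList ['1'] := by decide

lemma zero_str : ("0" : String) = String.ofList ['0'] := by decide

lemma go_char (fuel : Nat) (l cur : List Char) (acc : List (List Char))
    (h : l.length ≤ fuel) :
    PySem.Chars.splitOn.go ['1'] fuel l cur acc
      = acc.reverse ++ (split1 '1' l).modifyHead (fun x => cur.reverse ++ x) := by
  induction fuel generalizing l cur acc with
  | zero =>
    interval_cases hl : l.length
    rw [List.length_eq_zero_iff] at hl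
    subst hl
    rw [PySem.Chars.splitOn.go.eq_def]
    simp [split1]
  | succ n ih =>
    cases l with
    | nil =>
      rw [PySem.Chars.splitOn.go.eq_def]
      simp [split1]
    | cons c rest =>
      rw [PySem.Chars.splitOn.go.eq_def]
      simp only [List.length_cons] at h
      by_cases hc : c = '1'
      · subst hc
        have hpre : List.isPrefixOf ['1'] ('1' :: rest) = true := by
          simp [List.isPrefixOf]
        simp only [hpre, if_true, List.length_cons, List.length_nil, List.drop_succ_cons,
          List.drop_zero]
        rw [ih rest [] (cur.reverse :: acc) (by omega)]
        have : split1 '1' ('1' :: rest) = [] :: split1 '1' rest := by simp [split1]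
        rw [this]
        cases hs : split1 '1' rest with
        | nil => exact absurd hs (split1_ne_nil _ _)
        | cons h t => simp
      · have hpre : List.isPrefixOf ['1'] (c :: rest) = false := by
          simp [List.isPrefixOf]
          exact fun hh => hc hh.symm
        simp only [hpre, Bool.false_eq_true, if_false]
        rw [ih rest (c :: cur) acc (by omega)]
        have : split1 '1' (c :: rest)
            = match split1 '1' rest with
              | [] => [[c]]
              | h :: t => (c :: h) :: t := by
          simp [split1, hc]
        rw [this]
        cases hs : split1 '1' rest with
        | nil => exact absurd hs (split1_ne_nil _ _)
        | cons h t => simp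

lemma splitOn_eq_split1 (cs : List Char) :
    PySem.Chars.splitOn cs ['1'] = split1 '1' cs := by
  unfold PySem.Chars.splitOn
  rw [go_char (cs.length + 1) cs [] [] (by omega)]
  cases hs : split1 '1' cs with
  | nil => exact absurd hs (split1_ne_nil _ _)
  | cons h t => simp

-- the gaps B computes, as a function of the raw char list
def gapsOf (cs : List Char) : List Int :=
  ((split1 '1' cs).take (cs.count '1')).map (fun seg => (seg.length : Int))

def addHead (c0 : Int) : List Int → List Int
  | [] => []
  | x :: t => (c0 + x) :: t

lemma addHead_zero (l : List Int) : addHead 0 l = l := by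
  cases l <;> simp [addHead]

-- characterization of A's run-length loop
lemma runs_loop (cs : List Char) (acc : List Int) (c0 : Int) :
    (cs.foldl (fun (p : List Int × Int) c =>
        if c = '1' then (p.1 ++ [p.2], 0) else (p.1, p.2 + 1)) (acc, c0)).1
      = acc ++ addHead c0 (gapsOf cs) := by
  induction cs generalizing acc c0 with
  | nil => simp [gapsOf, split1, addHead]
  | cons c cs ih =>
    by_cases hc : c = '1'
    · subst hc
      simp only [List.foldl_cons, if_true]
      rw [ih]
      have h1 : gapsOf ('1' :: cs) = 0 :: gapsOf cs := by
        simp [gapsOf, split1, List.count_cons]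
      rw [h1, addHead_zero]
      simp [addHead]
    · simp only [List.foldl_cons, hc, if_false]
      rw [ih]
      have hcnt : (c :: cs).count '1' = cs.count '1' := by
        simp [List.count_cons, hc]
      cases hs : split1 '1' cs with
      | nil => exact absurd hs (split1_ne_nil _ _)
      | cons h t =>
        have h1 : split1 '1' (c :: cs) = (c :: h) :: t := by
          simp [split1, hc, hs]
        cases hk : cs.count '1' with
        | zero => simp [gapsOf, h1, hs, hcnt, hk, addHead]
        | succ k =>
          simp [gapsOf, h1, hs, hcnt, hk, addHead]
          push_cast
          ring

-- characterization of A's counting loop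
lemma count_loop (cs : List Char) (a b : Int) :
    (cs.foldl (fun (p : Int × Int) c =>
        if c = '1' then (p.1 + 1, p.2)
        else if c = '0' then (p.1, p.2 + 1)
        else p) (a, b))
      = (a + (cs.count '1' : Int), b + (cs.count '0' : Int)) := by
  induction cs generalizing a b with
  | nil => simp
  | cons c cs ih =>
    simp only [List.foldl_cons]
    by_cases h1 : c = '1'
    · subst h1
      rw [if_pos rfl, ih, Prod.mk.injEq]
      refine ⟨?_, ?_⟩ <;> simp [List.count_cons] <;> push_cast <;> ring
    · by_cases h0 : c = '0'
      · subst h0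
        rw [if_neg (by decide), if_pos rfl, ih, Prod.mk.injEq]
        refine ⟨?_, ?_⟩ <;> simp [List.count_cons] <;> push_cast <;> ring
      · rw [if_neg h1, if_neg h0, ih, Prod.mk.injEq]
        refine ⟨?_, ?_⟩ <;> simp [List.count_cons, h1, h0]

lemma count_map_sing (cs : List Char) (d : Char) :
    PySem.List.count (cs.map (fun c => String.ofList [c])) (String.ofList [d]) = cs.count d := by
  rw [PySem.List.count_eq]
  induction cs with
  | nil => simp
  | cons c cs ih =>
    simp only [List.map_cons, List.count_cons, ih]
    rw [singleton_beq]

lemma toList_join_sing (cs : List Char) :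
    (PySem.Str.join "" (cs.map (fun c => String.ofList [c]))).toList = cs := by
  rw [PySem.Str.toList_join]
  have h1 : ("" : String).toList = [] := by decide
  have h2 : (cs.map (fun c => String.ofList [c])).map String.toList
      = cs.map (fun c => [c]) := by
    simp [List.map_map, Function.comp]
  rw [h1, h2, PySem.Chars.join_nil_singletons]

-- ===== VERDICT (by name: the statement is the Claim_ definition above) =====
theorem solution_spec : Claim_equal_solution := by
  intro num _ _
  unfold Spec_solution solution solution_alt
  simp only []
  set cs := ((PySem.Int.pyBin num).toList).drop 2 with hcs
  have hsl : PySem.List.slice ((PySem.Int.pyBin num).toList.map (fun c => String.ofList [c]))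
        (some 2) none
      = cs.map (fun c => String.ofList [c]) := by
    rw [PySem.List.slice_from _ (by norm_num : (0:Int) ≤ 2)]
    simp [hcs, List.map_drop]
  rw [hsl]
  -- counts
  have hfold1 :
      ((cs.map (fun c => String.ofList [c])).foldl (fun (p : Int × Int) i =>
        if i == "1" then (p.1 + 1, p.2)
        else if i == "0" then (p.1, p.2 + 1)
        else p) (0, 0))
      = ((cs.count '1' : Int), (cs.count '0' : Int)) := by
    rw [List.foldl_map]
    have he : (fun (p : Int × Int) (c : Char) =>
        if String.ofList [c] == "1" then (p.1 + 1, p.2)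
        else if String.ofList [c] == "0" then (p.1, p.2 + 1)
        else p)
        = (fun (p : Int × Int) (c : Char) =>
        if c = '1' then (p.1 + 1, p.2)
        else if c = '0' then (p.1, p.2 + 1)
        else p) := by
      funext p c
      rw [one_str, zero_str, singleton_beq, singleton_beq]
      simp
    rw [he, count_loop]
    simp
  have hfold2 :
      ((cs.map (fun c => String.ofList [c])).foldl (fun (p : List Int × Int) i =>
        if i == "1" then (p.1 ++ [p.2], 0) else (p.1, p.2 + 1)) ([], 0)).1
      = gapsOf cs := by
    rw [List.foldl_map]
    have he : (fun (p : List Int × Int) (c : Char) =>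
        if String.ofList [c] == "1" then (p.1 ++ [p.2], 0) else (p.1, p.2 + 1))
        = (fun (p : List Int × Int) (c : Char) =>
        if c = '1' then (p.1 ++ [p.2], 0) else (p.1, p.2 + 1)) := by
      funext p c
      rw [one_str, singleton_beq]
      simp
    rw [he, runs_loop]
    simp [addHead_zero]
  rw [hfold1, hfold2]
  have hc1 : PySem.List.count (cs.map (fun c => String.ofList [c])) "1" = cs.count '1' := by
    rw [one_str, count_map_sing]
  have hc0 : PySem.List.count (cs.map (fun c => String.ofList [c])) "0" = cs.count '0' := by
    rw [zero_str, count_map_sing]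
  rw [hc1, hc0]
  have hguard : (((cs.count '0' : Int)) == 0 || ((cs.count '1' : Int)) == 1)
      = ((cs.count '0' == 0) || (cs.count '1' == 1)) := by
    apply Bool.eq_iff_iff.mpr
    simp only [Bool.or_eq_true, beq_iff_eq]
    omega
  rw [hguard]
  by_cases hg : (cs.count '0' == 0 || cs.count '1' == 1) = true
  · rw [hg]
    simp only [eq_self_iff_true, if_true]
  · rw [Bool.not_eq_true] at hg
    rw [hg]
    simp only [Bool.false_eq_true, if_false]
    have hseg : PySem.Chars.splitOn
          (PySem.Str.join "" (cs.map (fun c => String.ofList [c]))).toList ['1']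
        = split1 '1' cs := by
      rw [toList_join_sing, splitOn_eq_split1]
    rw [hseg]
    rfl
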